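-- pv_equiv track=rewrite | github.com/channymc/coverpack | sg.py | pick_best_texture
-- ===== SOURCE A (Python) =====
-- from typing import Any, Dict, Iterable, Iterator, List, Optional, Set, Tuple, Union
--
-- TEXTURE_KEY_PRIORITY: Tuple[str, ...] = (
--     "layer0",   # 2-D item — most common for custom items
--     "layer1",   # secondary (leather trim, dye overlay, etc.)
--     "all",      # uniform block face
--     "texture",
--     "top",  "side", "front", "back", "bottom",
--     "cross", "plant", "particle",
--     "fan", "end", "edge",
--     "north", "south", "east", "west",
--     "pane", "stem",
-- )
--
-- def pick_best_texture(textures: Dict[str, str]) -> Optional[str]: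
--     """
--     Choose the most representative texture reference from a resolved dict.
--     Follows TEXTURE_KEY_PRIORITY, then falls back to the first non-variable value.
--     Returns None if no usable texture found.
--     """
--     # Priority-ordered lookup
--     for key in TEXTURE_KEY_PRIORITY:
--         val = textures.get(key)
--         if val and isinstance(val, str) and not val.startswith("#"):
--             return val
--     # Fallback: any non-variable value
--     for val in textures.values():
--         if isinstance(val, str) and not val.startswith("#"):
--             return val
--     return None
-- ===== SOURCE B (Python) =====
-- from typing import Dict, Optional, Tuple
--
-- TEXTURE_KEY_PRIORITY: Tuple[str, ...] = (
--     "layer0", "layer1", "all", "texture",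
--     "top", "side", "front", "back", "bottom",
--     "cross", "plant", "particle",
--     "fan", "end", "edge",
--     "north", "south", "east", "west",
--     "pane", "stem",
-- )
--
-- _RANK = {key: i for i, key in enumerate(TEXTURE_KEY_PRIORITY)}
--
-- def pick_best_texture(textures: Dict[str, str]) -> Optional[str]:
--     """Single pass over the dict: keep the value at the priority key of
--     smallest rank (truthy, non-variable) and the first non-variable value
--     as a fallback."""
--     best = None
--     best_rank = len(TEXTURE_KEY_PRIORITY)
--     fallback = None
--     for key, val in textures.items():
--         if isinstance(val, str) and not val.startswith("#"):
--             if fallback is None: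
--                 fallback = val
--             r = _RANK.get(key)
--             if r is not None and val and r < best_rank:
--                 best, best_rank = val, r
--     return best if best is not None else fallback
-- ===== Notes on version B (the rewrite author's own statement) =====
-- stated objective: alternative
-- what changed: Replaces A's two passes (a priority-ordered sequence of dict lookups, then a second scan over the values) by a single pass over the items that maintains a best-priority-rank accumulator (using a rank map built once from TEXTURE_KEY_PRIORITY) and a first-fallback accumulator; Pre_ excludes association lists with duplicate keys, which do not encode any dict input of A (Python dicts cannot contain duplicate keys).
import Mathlib
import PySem

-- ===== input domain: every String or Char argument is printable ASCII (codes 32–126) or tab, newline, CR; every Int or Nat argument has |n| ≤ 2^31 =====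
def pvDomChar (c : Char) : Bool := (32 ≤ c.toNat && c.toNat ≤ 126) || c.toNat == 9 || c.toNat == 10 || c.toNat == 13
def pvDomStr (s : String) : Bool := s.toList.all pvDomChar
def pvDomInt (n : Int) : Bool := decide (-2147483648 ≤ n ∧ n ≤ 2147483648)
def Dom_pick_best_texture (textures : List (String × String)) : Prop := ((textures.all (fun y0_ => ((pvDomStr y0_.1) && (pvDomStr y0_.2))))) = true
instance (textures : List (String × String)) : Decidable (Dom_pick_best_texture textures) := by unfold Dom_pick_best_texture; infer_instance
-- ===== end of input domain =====

-- B replaces A's 21 dict lookups (priority scan) + second pass over the values by ONE pass over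
-- the items keeping a best-rank accumulator (rank map built once) and a first-fallback accumulator.

-- ===== PORT A =====
def TEXTURE_KEY_PRIORITY : List String :=
  ["layer0", "layer1", "all", "texture",
   "top", "side", "front", "back", "bottom",
   "cross", "plant", "particle",
   "fan", "end", "edge",
   "north", "south", "east", "west",
   "pane", "stem"]

-- 'for key in TEXTURE_KEY_PRIORITY: val = textures.get(key); if val and … and not val.startswith("#"): return val'
def pickPrioLoop (d : PySem.Dict String String) : List String → Option String
  | [] => none
  | key :: rest =>
    match d.get? key with
    | some val => if val ≠ "" ∧ PySem.Str.startswith val "#" = false then some val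
                  else pickPrioLoop d rest
    | none => pickPrioLoop d rest

-- 'for val in textures.values(): if isinstance(val, str) and not val.startswith("#"): return val'
def pickFallbackLoop : List String → Option String
  | [] => none
  | val :: rest => if PySem.Str.startswith val "#" = false then some val else pickFallbackLoop rest

def pick_best_texture (textures : List (String × String)) : Option String :=
  let d := PySem.Dict.mk textures
  match pickPrioLoop d TEXTURE_KEY_PRIORITY with
  | some v => some v
  | none =>
    match pickFallbackLoop d.values with
    | some v => some v
    | none => none

-- ===== PORT B =====
-- '_RANK = {key: i for i, key in enumerate(TEXTURE_KEY_PRIORITY)}'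
def RANK : PySem.Dict String Int :=
  PySem.Dict.ofList ((PySem.List.enumerate TEXTURE_KEY_PRIORITY).map (fun p => (p.2, p.1)))

-- one iteration of B's 'for key, val in textures.items():' body over (best, best_rank, fallback)
def bStep (st : Option String × Int × Option String) (kv : String × String) :
    Option String × Int × Option String :=
  let (best, best_rank, fallback) := st
  if PySem.Str.startswith kv.2 "#" = false then
    let fallback' := if fallback = none then some kv.2 else fallback
    match RANK.get? kv.1 with
    | some r => if kv.2 ≠ "" ∧ r < best_rank then (some kv.2, r, fallback')
                else (best, best_rank, fallback')
    | none => (best, best_rank, fallback')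
  else st

def pick_best_texture_alt (textures : List (String × String)) : Option String :=
  let res := textures.foldl bStep (none, (TEXTURE_KEY_PRIORITY.length : Int), none)
  match res.1 with
  | some v => some v
  | none => res.2.2

-- ===== PRECONDITION & SPEC =====
-- Pre_ excludes association lists with duplicate keys: the Python argument is a dict, which cannot
-- have them, so such lists do not encode any dict input of A (dict conversion would collapse them).
def Pre_pick_best_texture (textures : List (String × String)) : Prop :=
  (textures.map Prod.fst).Nodup
instance (textures : List (String × String)) : Decidable (Pre_pick_best_texture textures) := by
  unfold Pre_pick_best_texture; infer_instance

def pvWitness_pick_best_texture : (List (String × String)) :=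
  [("particle", "#p"), ("side", ""), ("top", "block/oak_top"), ("bottom", "block/oak")]

def Spec_pick_best_texture (textures : List (String × String)) (out : Option String) : Prop := out = pick_best_texture_alt textures
instance (textures : List (String × String)) (out : Option String) : Decidable (Spec_pick_best_texture textures out) := by unfold Spec_pick_best_texture; infer_instance

-- ===== CLAIM (what is proved, stated in full; the proofs are below) =====
def Claim_equal_pick_best_texture : Prop := ∀ (textures : List (String × String)), Dom_pick_best_texture textures → Pre_pick_best_texture textures → Spec_pick_best_texture textures (pick_best_texture textures)

-- ===== LEMMAS AND PROOFS =====

-- candidates of B's best-rank accumulator: (rank, value) of each item with a truthy non-variable value at a priority key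
def cands (ts : List (String × String)) : List (Int × String) :=
  ts.filterMap (fun kv =>
    if PySem.Str.startswith kv.2 "#" = false ∧ kv.2 ≠ "" then
      (RANK.get? kv.1).map (fun r => (r, kv.2))
    else none)

-- values eligible for the fallback (non-variable, truthiness NOT required)
def fbs (ts : List (String × String)) : List String :=
  ts.filterMap (fun kv => if PySem.Str.startswith kv.2 "#" = false then some kv.2 else none)

-- first element with the strictly smallest rank
def selMin : List (Int × String) → Option (Int × String)
  | [] => none
  | (r, v) :: rest =>
    match selMin rest with
    | none => some (r, v)
    | some (r', v') => if r' < r then some (r', v') else some (r, v)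

def combB : (Option String × Int) → List (Int × String) → (Option String × Int)
  | st, [] => st
  | (b, br), (r, v) :: rest => combB (if r < br then (some v, r) else (b, br)) rest

def combF : Option String → List String → Option String
  | fb, [] => fb
  | fb, v :: rest => combF (if fb = none then some v else fb) rest

set_option maxHeartbeats 1000000 in
lemma RANK_char (k : String) (r : Int) (h : RANK.get? k = some r) :
    0 ≤ r ∧ r < 21 ∧ TEXTURE_KEY_PRIORITY.getD r.toNat "" = k := by
  have hm : (k, r) ∈ RANK.items := PySem.Dict.mem_items_of_get?_eq_some RANK h
  have hall : ∀ p ∈ RANK.items,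
      0 ≤ p.2 ∧ p.2 < 21 ∧ TEXTURE_KEY_PRIORITY.getD p.2.toNat "" = p.1 := by decide
  exact hall _ hm

lemma RANK_nth (i : Nat) (h : i < 21) :
    RANK.get? (TEXTURE_KEY_PRIORITY.getD i "") = some (i : Int) := by
  have hfin : ∀ j : Fin 21, RANK.get? (TEXTURE_KEY_PRIORITY.getD j.val "") = some (j.val : Int) := by
    decide
  exact hfin ⟨i, h⟩

lemma selMin_mem (cs : List (Int × String)) (p : Int × String) (h : selMin cs = some p) :
    p ∈ cs := by
  induction cs generalizing p with
  | nil => simp [selMin] at h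
  | cons hd rest ih =>
    obtain ⟨a, w⟩ := hd
    simp only [selMin] at h
    split at h
    · simp at h; simp [h]
    · rename_i r' v' hsel
      split at h
      · exact List.mem_cons_of_mem _ (ih _ (by rw [hsel, h]))
      · simp at h; simp [h]

lemma selMin_spec (cs : List (Int × String)) (i : Int) (v : String)
    (hmem : (i, v) ∈ cs) (hlb : ∀ rv ∈ cs, i ≤ rv.1)
    (huniq : ∀ w, (i, w) ∈ cs → w = v) :
    selMin cs = some (i, v) := by
  induction cs with
  | nil => cases hmem
  | cons hd rest ih =>
    obtain ⟨a, w⟩ := hd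
    rcases List.mem_cons.mp hmem with heq | hmemr
    · obtain ⟨rfl, rfl⟩ := Prod.mk.injEq .. ▸ heq
      simp only [selMin]
      split
      · rfl
      · rename_i r' v' hsel
        have hq : (r', v') ∈ rest := selMin_mem _ _ hsel
        have hle : i ≤ r' := hlb _ (List.mem_cons_of_mem _ hq)
        rw [if_neg (by omega)]
    · have hrest : selMin rest = some (i, v) :=
        ih hmemr (fun rv h => hlb rv (List.mem_cons_of_mem _ h))
          (fun w h => huniq w (List.mem_cons_of_mem _ h))
      simp only [selMin, hrest]
      have ha : i ≤ a := hlb _ (List.mem_cons_self)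
      by_cases hlt : i < a
      · rw [if_pos hlt]
      · have haa : a = i := by omega
        subst haa
        have hw : w = v := huniq w (List.mem_cons_self)
        subst hw
        rw [if_neg (by omega)]

lemma selMin_filter_lt (cs : List (Int × String)) (r br : Int) (hr : r ≤ br) :
    selMin (cs.filter (fun rv => rv.1 < r)) =
      match selMin (cs.filter (fun rv => rv.1 < br)) with
      | some (r', v') => if r' < r then some (r', v') else none
      | none => none := by
  induction cs with
  | nil => rfl
  | cons hd rest ih =>
    obtain ⟨a, w⟩ := hd
    cases hbr : selMin (List.filter (fun rv => decide (rv.1 < br)) rest) with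
    | none =>
      rw [hbr] at ih
      simp only at ih
      by_cases har : a < r
      · have habr : a < br := by omega
        simp only [List.filter_cons, decide_eq_true_eq, if_pos har, if_pos habr, selMin, ih, hbr]
      · by_cases habr : a < br
        · simp only [List.filter_cons, decide_eq_true_eq, if_neg har, if_pos habr, selMin, ih, hbr]
        · simp only [List.filter_cons, decide_eq_true_eq, if_neg har, if_neg habr, ih, hbr]
    | some q =>
      obtain ⟨r', v'⟩ := q
      rw [hbr] at ih
      simp only at ih
      have hr'br : r' < br := by
        have := selMin_mem _ _ hbr
        simpa using (List.of_mem_filter this)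
      by_cases har : a < r
      · have habr : a < br := by omega
        by_cases hr' : r' < r
        · simp only [List.filter_cons, decide_eq_true_eq, if_pos har, if_pos habr, selMin,
            if_pos hr'] at ih ⊢
          simp only [ih, hbr]
          by_cases hra : r' < a
          · simp only [if_pos hra, if_pos hr']
          · simp only [if_neg hra, if_pos har]
        · simp only [if_neg hr'] at ih
          simp only [List.filter_cons, decide_eq_true_eq, if_pos har, if_pos habr, selMin, ih, hbr]
          rw [if_neg (show ¬ r' < a by omega)]
          simp [har]
      · by_cases habr : a < br
        · simp only [List.filter_cons, decide_eq_true_eq, if_neg har, if_pos habr, selMin, ih, hbr]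
          by_cases hra : r' < a
          · simp [hra]
          · rw [if_neg (show ¬ r' < r by omega)]
            simp [hra, har]
        · simp only [List.filter_cons, decide_eq_true_eq, if_neg (show ¬ a < r by omega),
            if_neg habr, ih, hbr]

lemma combB_eq_selMin (cs : List (Int × String)) (b : Option String) (br : Int) :
    combB (b, br) cs =
      match selMin (cs.filter (fun rv => rv.1 < br)) with
      | none => (b, br)
      | some (r', v') => (some v', r') := by
  induction cs generalizing b br with
  | nil => rfl
  | cons hd rest ih =>
    obtain ⟨a, w⟩ := hd
    simp only [combB]
    by_cases hlt : a < br
    · rw [if_pos hlt]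
      rw [ih]
      have hsub := selMin_filter_lt rest a br (le_of_lt hlt)
      simp only [List.filter_cons, decide_eq_true_eq, if_pos hlt, selMin]
      cases hbrr : selMin (List.filter (fun rv => decide (rv.1 < br)) rest) with
      | none =>
        rw [hbrr] at hsub
        simp only at hsub
        rw [hsub]
      | some q =>
        obtain ⟨r', v'⟩ := q
        rw [hbrr] at hsub
        simp only at hsub
        rw [hsub]
        by_cases hra : r' < a
        · simp [hra]
        · simp [hra]
    · rw [if_neg hlt]
      rw [ih]
      simp only [List.filter_cons, decide_eq_true_eq, if_neg hlt]

lemma combF_some (l : List String) (x : String) : combF (some x) l = some x := by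
  induction l with
  | nil => rfl
  | cons v rest ih => simpa [combF] using ih

lemma combF_none_eq_head? (l : List String) : combF none l = l.head? := by
  cases l with
  | nil => rfl
  | cons v rest => simp [combF, combF_some]

lemma foldl_bStep (ts : List (String × String)) (b : Option String) (br : Int) (fb : Option String) :
    ts.foldl bStep (b, br, fb) =
      ((combB (b, br) (cands ts)).1, (combB (b, br) (cands ts)).2, combF fb (fbs ts)) := by
  induction ts generalizing b br fb with
  | nil => rfl
  | cons hd rest ih =>
    obtain ⟨k, v⟩ := hd
    simp only [List.foldl_cons, bStep, cands, fbs, List.filterMap_cons]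
    by_cases hs : PySem.Str.startswith v "#" = false
    · rw [if_pos hs]
      simp only [hs, true_and]
      by_cases hv : v ≠ ""
      · simp only [if_pos hv]
        cases hg : RANK.get? k with
        | none =>
          simp only [Option.map_none]
          exact ih _ _ _
        | some r =>
          simp only [Option.map_some]
          by_cases hlt : r < br
          · simp only [if_pos (And.intro hv hlt)]
            rw [ih]
            simp only [cands, fbs, combB, if_pos hlt]
            rfl
          · have : ¬ (v ≠ "" ∧ r < br) := fun h => hlt h.2
            simp only [if_neg this]
            rw [ih]
            simp only [cands, fbs, combB, if_neg hlt]
            rfl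
      · simp only [if_neg hv]
        rw [not_ne_iff] at hv
        subst hv
        cases hg : RANK.get? k with
        | none =>
          exact ih _ _ _
        | some r =>
          have : ¬ (("" : String) ≠ "" ∧ r < br) := fun h => h.1 rfl
          simp only [if_neg this]
          exact ih _ _ _
    · rw [if_neg hs]
      have hs' : ¬ (PySem.Str.startswith v "#" = false ∧ v ≠ "") := fun h => hs h.1
      simp only [if_neg hs', if_neg hs]
      exact ih _ _ _

lemma mem_cands (ts : List (String × String)) (r : Int) (v : String) :
    (r, v) ∈ cands ts ↔
      ∃ k, (k, v) ∈ ts ∧ PySem.Str.startswith v "#" = false ∧ v ≠ "" ∧ RANK.get? k = some r := by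
  simp only [cands, List.mem_filterMap]
  constructor
  · rintro ⟨⟨k, w⟩, hmem, hf⟩
    by_cases hc : PySem.Str.startswith w "#" = false ∧ w ≠ ""
    · rw [if_pos hc] at hf
      cases hg : RANK.get? k with
      | none => rw [hg] at hf; cases hf
      | some r' =>
        rw [hg] at hf
        simp only [Option.map_some, Option.some.injEq, Prod.mk.injEq] at hf
        obtain ⟨rfl, rfl⟩ := hf
        exact ⟨k, hmem, hc.1, hc.2, hg⟩
    · rw [if_neg hc] at hf
      cases hf
  · rintro ⟨k, hmem, hs, hv, hg⟩
    exact ⟨(k, v), hmem, by rw [if_pos (And.intro hs hv), hg]; rfl⟩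

lemma fallback_eq (ts : List (String × String)) :
    pickFallbackLoop (ts.map Prod.snd) = (fbs ts).head? := by
  induction ts with
  | nil => rfl
  | cons hd rest ih =>
    obtain ⟨k, v⟩ := hd
    simp only [List.map_cons, pickFallbackLoop, fbs, List.filterMap_cons]
    by_cases hs : PySem.Str.startswith v "#" = false
    · rw [if_pos hs, if_pos hs]
      rfl
    · rw [if_neg hs, if_neg hs]
      exact ih

lemma prio_eq (ts : List (String × String)) (hnd : (ts.map Prod.fst).Nodup) :
    ∀ n i, i + n = 21 →
      pickPrioLoop (PySem.Dict.mk ts) (TEXTURE_KEY_PRIORITY.drop i) =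
        (selMin ((cands ts).filter (fun rv => (i : Int) ≤ rv.1))).map Prod.snd := by
  intro n
  induction n with
  | zero =>
    intro i hi
    have hi21 : i = 21 := by omega
    subst hi21
    have hempty : (cands ts).filter (fun rv => decide ((21 : Int) ≤ rv.1)) = [] := by
      apply List.filter_eq_nil_iff.mpr
      rintro ⟨rr, vv⟩ hrv
      obtain ⟨k, _, _, _, hg⟩ := (mem_cands ts rr vv).mp hrv
      have := RANK_char k rr hg
      simp only [decide_eq_true_eq]
      simp only [not_le]
      exact_mod_cast this.2.1
    simp only [Nat.cast_ofNat, hempty]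
    rfl
  | succ n ihn =>
    intro i hi
    have hlt : i < 21 := by omega
    have hlen : i < TEXTURE_KEY_PRIORITY.length := by
      have h21 : TEXTURE_KEY_PRIORITY.length = 21 := rfl
      omega
    rw [List.drop_eq_getElem_cons hlen]
    have hkey : RANK.get? (TEXTURE_KEY_PRIORITY[i]) = some (i : Int) := by
      have h := RANK_nth i hlt
      rwa [List.getD_eq_getElem _ _ hlen] at h
    have hkeys : (PySem.Dict.mk ts).keys.Nodup := by simpa [PySem.Dict.keys] using hnd
    simp only [pickPrioLoop]
    cases hget : (PySem.Dict.mk ts).get? (TEXTURE_KEY_PRIORITY[i]) with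
    | none =>
      rw [ihn (i + 1) (by omega)]
      have hfeq : (cands ts).filter (fun rv => decide ((i : Int) ≤ rv.1)) =
          (cands ts).filter (fun rv => decide (((i + 1 : Nat) : Int) ≤ rv.1)) := by
        apply List.filter_congr
        rintro ⟨rr, vv⟩ hrv
        obtain ⟨k, hmem, _, _, hg⟩ := (mem_cands ts rr vv).mp hrv
        have hchar := RANK_char k rr hg
        have hne : rr ≠ (i : Int) := by
          intro heq
          subst heq
          have hk : k = TEXTURE_KEY_PRIORITY[i] := by
            have := hchar.2.2
            rw [Int.toNat_natCast, List.getD_eq_getElem _ _ hlen] at this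
            exact this.symm
          subst hk
          have := PySem.Dict.get?_of_mem_items (PySem.Dict.mk ts) hmem hkeys
          rw [hget] at this
          cases this
        rw [decide_eq_decide]
        push_cast
        omega
      rw [hfeq]
    | some val =>
      dsimp only
      by_cases hcond : val ≠ "" ∧ PySem.Str.startswith val "#" = false
      · rw [if_pos hcond]
        have hmemts : (TEXTURE_KEY_PRIORITY[i], val) ∈ ts :=
          PySem.Dict.mem_items_of_get?_eq_some (PySem.Dict.mk ts) hget
        have hmem : ((i : Int), val) ∈
            (cands ts).filter (fun rv => decide ((i : Int) ≤ rv.1)) := by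
          apply List.mem_filter.mpr
          exact ⟨(mem_cands ts _ _).mpr ⟨_, hmemts, hcond.2, hcond.1, hkey⟩, by simp⟩
        have hlb : ∀ rv ∈ (cands ts).filter (fun rv => decide ((i : Int) ≤ rv.1)),
            (i : Int) ≤ rv.1 := by
          intro rv h
          simpa using (List.mem_filter.mp h).2
        have huniq : ∀ w, ((i : Int), w) ∈
            (cands ts).filter (fun rv => decide ((i : Int) ≤ rv.1)) → w = val := by
          intro w hw
          obtain ⟨k, hmem', _, _, hg⟩ := (mem_cands ts _ _).mp (List.mem_filter.mp hw).1
          have hchar := RANK_char k _ hg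
          have hk : k = TEXTURE_KEY_PRIORITY[i] := by
            have := hchar.2.2
            rw [Int.toNat_natCast, List.getD_eq_getElem _ _ hlen] at this
            exact this.symm
          subst hk
          have := PySem.Dict.get?_of_mem_items (PySem.Dict.mk ts) hmem' hkeys
          rw [hget] at this
          exact (Option.some.injEq _ _ ▸ this).symm
        rw [selMin_spec _ _ _ hmem hlb huniq]
        rfl
      · rw [if_neg hcond]
        rw [ihn (i + 1) (by omega)]
        have hfeq : (cands ts).filter (fun rv => decide ((i : Int) ≤ rv.1)) =
            (cands ts).filter (fun rv => decide (((i + 1 : Nat) : Int) ≤ rv.1)) := by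
          apply List.filter_congr
          rintro ⟨rr, vv⟩ hrv
          obtain ⟨k, hmem, hsw, hvv, hg⟩ := (mem_cands ts rr vv).mp hrv
          have hchar := RANK_char k rr hg
          have hne : rr ≠ (i : Int) := by
            intro heq
            subst heq
            have hk : k = TEXTURE_KEY_PRIORITY[i] := by
              have := hchar.2.2
              rw [Int.toNat_natCast, List.getD_eq_getElem _ _ hlen] at this
              exact this.symm
            subst hk
            have := PySem.Dict.get?_of_mem_items (PySem.Dict.mk ts) hmem hkeys
            rw [hget] at this
            have hvval : vv = val := by
              cases this
              rfl
            subst hvval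
            exact hcond ⟨hvv, hsw⟩
          rw [decide_eq_decide]
          push_cast
          omega
        rw [hfeq]

-- ===== VERDICT (by name: the statement is the Claim_ definition above) =====
theorem pick_best_texture_spec : Claim_equal_pick_best_texture := by
  intro ts hdom hnd
  unfold Pre_pick_best_texture at hnd
  unfold Spec_pick_best_texture pick_best_texture pick_best_texture_alt
  dsimp only
  have hlen21 : ((TEXTURE_KEY_PRIORITY.length : Nat) : Int) = 21 := by decide
  rw [hlen21, foldl_bStep ts none 21 none, combB_eq_selMin]
  have hA := prio_eq ts hnd 21 0 rfl
  simp only [List.drop_zero, Nat.cast_zero] at hA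
  have hfilter0 : (cands ts).filter (fun rv => decide ((0 : Int) ≤ rv.1)) = cands ts := by
    apply List.filter_eq_self.mpr
    rintro ⟨rr, vv⟩ hrv
    obtain ⟨k, _, _, _, hg⟩ := (mem_cands ts rr vv).mp hrv
    have := RANK_char k rr hg
    simp only [decide_eq_true_eq]
    exact this.1
  rw [hfilter0] at hA
  have hfilter21 : (cands ts).filter (fun rv => decide (rv.1 < (21 : Int))) = cands ts := by
    apply List.filter_eq_self.mpr
    rintro ⟨rr, vv⟩ hrv
    obtain ⟨k, _, _, _, hg⟩ := (mem_cands ts rr vv).mp hrv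
    have := RANK_char k rr hg
    simp only [decide_eq_true_eq]
    exact this.2.1
  rw [hfilter21, hA]
  cases hsel : selMin (cands ts) with
  | some q =>
    obtain ⟨r0, v0⟩ := q
    rfl
  | none =>
    simp only [Option.map_none]
    have hvals : (PySem.Dict.mk ts).values = ts.map Prod.snd := by
      simp [PySem.Dict.values]
    rw [hvals, fallback_eq]
    rw [combF_none_eq_head?]
    cases (fbs ts).head? with
    | none => rfl
    | some v => rfl
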